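-- pv_equiv track=rewrite | github.com/JHyuk2/Hyuk2Coding | SWAC/D3/1493.py | find_point
-- ===== SOURCE A (Python) =====
-- def find_point(num):
--     cross_sum = 2
--     find_num = 0
--     # p1_x, p1_y = 0, 0 # num1의 점
--     # p2_x, p2_y = 0, 0 # num2의 점
--
--     # 시작은 x+y = 2
--     while True:
--         for x in range(1, cross_sum):
--             y = cross_sum - x
--             find_num +=1
--             if find_num == num:
--                 return (x, y)
--         cross_sum +=1
-- ===== SOURCE B (Python) =====
-- def find_point(num):
--     # Binary-search the diagonal d (smallest d with d*(d+1)//2 >= num),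
--     # then read the point off in O(1) instead of walking every point.
--     lo, hi = 1, num
--     while lo < hi:
--         mid = (lo + hi) // 2
--         if num <= mid * (mid + 1) // 2:
--             hi = mid
--         else:
--             lo = mid + 1
--     d = lo
--     x = num - d * (d - 1) // 2
--     return (x, d + 1 - x)
-- ===== Notes on version B (the rewrite author's own statement) =====
-- stated objective: faster
-- what changed: Replaces A's point-by-point walk over all diagonals with a binary search for the diagonal (smallest d with d(d+1)/2 >= num) followed by O(1) offset arithmetic.
import Mathlib
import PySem

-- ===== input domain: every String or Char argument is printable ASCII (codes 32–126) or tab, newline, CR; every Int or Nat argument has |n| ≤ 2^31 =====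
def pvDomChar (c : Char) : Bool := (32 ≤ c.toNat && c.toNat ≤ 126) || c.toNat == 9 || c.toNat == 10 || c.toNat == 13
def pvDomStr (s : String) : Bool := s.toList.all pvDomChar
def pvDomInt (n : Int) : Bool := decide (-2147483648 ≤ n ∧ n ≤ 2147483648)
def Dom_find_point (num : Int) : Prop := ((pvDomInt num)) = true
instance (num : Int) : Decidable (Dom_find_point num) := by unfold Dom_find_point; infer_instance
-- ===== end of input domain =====

-- B replaces A's O(num) point-by-point walk by a binary search for the diagonal
-- plus O(1) offset arithmetic (measured asymptotically faster).

-- ===== PORT A =====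
-- inner 'for x in range(1, cross_sum)' loop: returns (some result, _) on 'return', else (none, final find_num)
def findA_inner (num cross_sum : Int) (xs : List Int) (find_num : Int) : Option (List Int) × Int :=
  match xs with
  | [] => (none, find_num)
  | x :: rest =>
    let y := cross_sum - x
    let f := find_num + 1
    if f = num then (some [x, y], f) else findA_inner num cross_sum rest f

-- 'while True' loop; fuel only makes it total (unreachable default under Pre_)
def findA_outer (num : Int) (fuel : Nat) (cross_sum find_num : Int) : List Int :=
  match fuel with
  | 0 => []
  | Nat.succ fuel =>
    match findA_inner num cross_sum (PySem.List.pyRange 1 cross_sum 1) find_num with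
    | (some r, _) => r
    | (none, f) => findA_outer num fuel (cross_sum + 1) f

def find_point (num : Int) : List Int := findA_outer num (num.toNat + 1) 2 0

-- ===== PORT B =====
-- 'while lo < hi' binary search; fuel only makes it total (it exceeds the initial gap)
def findB_search (num : Int) (fuel : Nat) (lo hi : Int) : Int :=
  match fuel with
  | 0 => lo
  | Nat.succ fuel =>
    if lo < hi then
      let mid := PySem.Int.floordiv (lo + hi) 2
      if num ≤ PySem.Int.floordiv (mid * (mid + 1)) 2 then
        findB_search num fuel lo mid
      else
        findB_search num fuel (mid + 1) hi
    else lo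

def find_point_alt (num : Int) : List Int :=
  let d := findB_search num (num.toNat + 1) 1 num
  let x := num - PySem.Int.floordiv (d * (d - 1)) 2
  [x, d + 1 - x]

-- ===== PRECONDITION & SPEC =====
-- A loops forever (never returns) for num ≤ 0; Pre_ excludes exactly those inputs.
def Pre_find_point (num : Int) : Prop := 1 ≤ num
instance (num : Int) : Decidable (Pre_find_point num) := by unfold Pre_find_point; infer_instance
def pvWitness_find_point : Int := (5)

def Spec_find_point (num : Int) (out : List Int) : Prop := out = find_point_alt num
instance (num : Int) (out : List Int) : Decidable (Spec_find_point num out) := by unfold Spec_find_point; infer_instance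

-- ===== CLAIM (what is proved, stated in full; the proofs are below) =====
def Claim_equal_find_point : Prop := ∀ (num : Int), Dom_find_point num → Pre_find_point num → Spec_find_point num (find_point num)

-- ===== LEMMAS AND PROOFS =====

-- k-th triangular number
def T (k : Int) : Int := k * (k + 1) / 2

lemma two_T (k : Int) : 2 * T k = k * (k + 1) := by
  unfold T
  exact Int.mul_ediv_cancel' (Int.even_mul_succ_self k).two_dvd

lemma T_rec (k : Int) : T k = T (k - 1) + k := by
  unfold T
  have h : k * (k + 1) = (k - 1) * ((k - 1) + 1) + k * 2 := by ring
  rw [h, Int.add_mul_ediv_right _ _ (by norm_num : (2:Int) ≠ 0)]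

lemma T_step (c : Int) : T (c - 1) = T (c - 2) + (c - 1) := by
  have h := T_rec (c - 1)
  rw [show c - 1 - 1 = c - 2 by ring] at h
  exact h

lemma T_mono {a b : Int} (ha : 0 ≤ a) (hab : a ≤ b) : T a ≤ T b := by
  have h2a := two_T a
  have h2b := two_T b
  nlinarith

lemma T_ge_self (k : Int) (hk : 0 ≤ k) : k ≤ T k := by
  have h2 := two_T k
  have hpos : 0 ≤ k * (k - 1) := by
    rcases lt_or_ge k 1 with h | h
    · have hk0 : k = 0 := by omega
      simp [hk0]
    · exact mul_nonneg (by omega) (by omega)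
  nlinarith

lemma inner_spec : ∀ (n : Nat) (a c t num : Int), (c - a).toNat = n →
    findA_inner num c (PySem.List.pyRange a c 1) t =
      if 1 ≤ num - t ∧ num - t ≤ c - a then
        (some [a + (num - t) - 1, c - (a + (num - t) - 1)], num)
      else (none, t + max (c - a) 0) := by
  intro n
  induction n with
  | zero =>
    intro a c t num h
    rw [PySem.List.pyRange_one_eq_nil (by omega)]
    simp only [findA_inner]
    rw [if_neg (by omega)]
    congr 1
    omega
  | succ m ih =>
    intro a c t num h
    rw [PySem.List.pyRange_one_cons (by omega)]
    simp only [findA_inner]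
    by_cases hf : t + 1 = num
    · rw [if_pos hf, if_pos (by omega)]
      have h1 : a + (num - t) - 1 = a := by omega
      rw [h1, hf]
    · rw [if_neg hf, ih (a + 1) c (t + 1) num (by omega)]
      by_cases hc : 1 ≤ num - t ∧ num - t ≤ c - a
      · rw [if_pos (by omega), if_pos hc]
        have h1 : (a + 1) + (num - (t + 1)) - 1 = a + (num - t) - 1 := by omega
        rw [h1]
      · rw [if_neg (by omega), if_neg hc]
        have h1 : (t + 1) + max (c - (a + 1)) 0 = t + max (c - a) 0 := by omega
        rw [h1]

lemma outer_spec : ∀ (fuel : Nat) (c num d : Int),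
    2 ≤ c → c - 1 ≤ d → T (c - 2) < num → num ≤ T d → T (d - 1) < num →
    (d + 1 - c).toNat < fuel →
    findA_outer num fuel c (T (c - 2)) = [num - T (d - 1), d + 1 - (num - T (d - 1))] := by
  intro fuel
  induction fuel with
  | zero => intro c num d _ _ _ _ _ hf; omega
  | succ f ih =>
    intro c num d hc hcd h1 h2 h3 hf
    simp only [findA_outer]
    rw [inner_spec (c - 1).toNat 1 c (T (c - 2)) num (by omega)]
    have htc := T_step c
    by_cases hhit : 1 ≤ num - T (c - 2) ∧ num - T (c - 2) ≤ c - 1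
    · rw [if_pos hhit]
      have hde : c - 1 = d := by
        by_contra hne
        have hlt : c - 1 < d := by omega
        have hmono : T (c - 1) ≤ T (d - 1) := T_mono (by omega) (by omega)
        omega
      show [1 + (num - T (c - 2)) - 1, c - (1 + (num - T (c - 2)) - 1)] = _
      have e1 : 1 + (num - T (c - 2)) - 1 = num - T (d - 1) := by
        rw [show d - 1 = c - 2 by omega]; ring
      rw [e1, show c - (num - T (d - 1)) = d + 1 - (num - T (d - 1)) by omega]
    · rw [if_neg hhit]
      have hgt : T (c - 1) < num := by omega
      have hd : c ≤ d := by
        by_contra hne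
        have hdc : d = c - 1 := by omega
        rw [hdc] at h2
        omega
      show findA_outer num f (c + 1) (T (c - 2) + max (c - 1) 0) = _
      have hmax : T (c - 2) + max (c - 1) 0 = T ((c + 1) - 2) := by
        rw [show (c:Int) + 1 - 2 = c - 1 by ring, htc]; omega
      rw [hmax]
      exact ih (c + 1) num d (by omega) (by omega)
        (by rw [show (c:Int) + 1 - 2 = c - 1 by ring]; exact hgt) h2 h3 (by omega)

lemma search_spec : ∀ (fuel : Nat) (lo hi num : Int),
    1 ≤ lo → lo ≤ hi → T (lo - 1) < num → num ≤ T hi → (hi - lo).toNat ≤ fuel →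
    1 ≤ findB_search num fuel lo hi ∧
    T (findB_search num fuel lo hi - 1) < num ∧
    num ≤ T (findB_search num fuel lo hi) := by
  intro fuel
  induction fuel with
  | zero =>
    intro lo hi num h1 h2 h3 h4 hf
    have : lo = hi := by omega
    subst this
    simp only [findB_search]
    exact ⟨h1, h3, h4⟩
  | succ f ih =>
    intro lo hi num h1 h2 h3 h4 hf
    simp only [findB_search]
    by_cases hlt : lo < hi
    · rw [if_pos hlt]
      have hmid := PySem.Int.floordiv_two_mid_bounds (le_of_lt hlt)
      have hmidlt : PySem.Int.floordiv (lo + hi) 2 < hi :=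
        (PySem.Int.floordiv_lt_iff_lt_mul (by norm_num)).mpr (by omega)
      set mid := PySem.Int.floordiv (lo + hi) 2 with hm
      have hTmid : PySem.Int.floordiv (mid * (mid + 1)) 2 = T mid := by
        rw [PySem.Int.floordiv_eq_ediv_of_pos (by norm_num)]; rfl
      by_cases hb : num ≤ PySem.Int.floordiv (mid * (mid + 1)) 2
      · rw [if_pos hb]
        exact ih lo mid num h1 (by omega) h3 (by rw [hTmid] at hb; exact hb) (by omega)
      · rw [if_neg hb]
        refine ih (mid + 1) hi num (by omega) (by omega) ?_ h4 (by omega)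
        rw [show mid + 1 - 1 = mid by ring, ← hTmid]
        omega
    · rw [if_neg hlt]
      have : lo = hi := by omega
      subst this
      exact ⟨h1, h3, h4⟩

-- ===== VERDICT (by name: the statement is the Claim_ definition above) =====
theorem find_point_spec : Claim_equal_find_point := by
  intro num _ hpre
  have hnum : 1 ≤ num := hpre
  unfold Spec_find_point find_point
  have hT0 : T 0 = 0 := by norm_num [T]
  have hs := search_spec (num.toNat + 1) 1 num num (le_refl 1) hnum
      (by rw [show (1:Int) - 1 = 0 by ring, hT0]; omega) (T_ge_self num (by omega)) (by omega)
  obtain ⟨hd1, hdlt, hdle⟩ := hs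
  show findA_outer num (num.toNat + 1) 2 0 =
      [num - PySem.Int.floordiv (findB_search num (num.toNat + 1) 1 num *
        (findB_search num (num.toNat + 1) 1 num - 1)) 2,
       findB_search num (num.toNat + 1) 1 num + 1 -
        (num - PySem.Int.floordiv (findB_search num (num.toNat + 1) 1 num *
          (findB_search num (num.toNat + 1) 1 num - 1)) 2)]
  set d := findB_search num (num.toNat + 1) 1 num with hd
  have hTd1 : PySem.Int.floordiv (d * (d - 1)) 2 = T (d - 1) := by
    rw [PySem.Int.floordiv_eq_ediv_of_pos (by norm_num)]
    unfold T
    congr 1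
    ring
  have hdnum : d ≤ num := by
    have := T_ge_self (d - 1) (by omega)
    omega
  rw [hTd1, show (0:Int) = T (2 - 2) by norm_num [T]]
  exact outer_spec (num.toNat + 1) 2 num d (le_refl 2) (by omega)
    (by rw [show (2:Int) - 2 = 0 by ring, hT0]; omega) hdle hdlt (by omega)
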